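-- pv_equiv track=rewrite | github.com/rivajw/av-parkinglot-path-planning | reverse.py | _cluster_consecutive
-- ===== SOURCE A (Python) =====
-- def _cluster_consecutive(indices, max_gap=1):
--     """
--     Cluster sorted integer indices into consecutive groups.
--     """
--     if len(indices) == 0:
--         return []
--
--     groups = [[int(indices[0])]]
--     for v in indices[1:]:
--         v = int(v)
--         if v - groups[-1][-1] <= max_gap:
--             groups[-1].append(v)
--         else:
--             groups.append([v])
--     return groups
-- ===== SOURCE B (Python) =====
-- def _cluster_consecutive(indices, max_gap=1):
--     """
--     Cluster sorted integer indices into consecutive groups.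
--
--     Instead of growing the last group in place, find each run's end index
--     with an inner scan over adjacent gaps and emit the run as one slice.
--     """
--     vals = [int(v) for v in indices]
--     n = len(vals)
--     groups = []
--     i = 0
--     while i < n:
--         j = i + 1
--         while j < n and vals[j] - vals[j - 1] <= max_gap:
--             j += 1
--         groups.append(vals[i:j])
--         i = j
--     return groups
-- ===== Notes on version B (the rewrite author's own statement) =====
-- stated objective: alternative
-- what changed: B splits the list into maximal runs by scanning for each run's end index over adjacent gaps and slicing it out, instead of A's single fold that grows the last group in place or starts a new group.
import Mathlib
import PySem

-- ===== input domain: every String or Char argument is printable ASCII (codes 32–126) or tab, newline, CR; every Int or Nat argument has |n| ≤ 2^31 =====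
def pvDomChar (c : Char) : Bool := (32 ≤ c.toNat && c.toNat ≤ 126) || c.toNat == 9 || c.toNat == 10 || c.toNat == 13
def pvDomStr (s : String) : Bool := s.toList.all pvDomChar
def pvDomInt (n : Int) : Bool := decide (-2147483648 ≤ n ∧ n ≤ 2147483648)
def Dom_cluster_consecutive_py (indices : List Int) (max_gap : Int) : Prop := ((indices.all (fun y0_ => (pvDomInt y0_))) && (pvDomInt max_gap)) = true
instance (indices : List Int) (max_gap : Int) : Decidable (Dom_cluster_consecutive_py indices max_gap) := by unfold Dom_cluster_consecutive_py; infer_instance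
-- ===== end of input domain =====

-- B clusters by locating each run's end index with an inner scan and slicing the run out,
-- instead of A's single fold that grows the last group in place (objective: alternative).

-- ===== PORT A =====
-- loop body of A: the last element of the last group is (groups.getLastD []).getLastD 0;
-- appending v to the last group replaces it; int(v) is the identity on Int inputs.
def stepA (max_gap : Int) (groups : List (List Int)) (v : Int) : List (List Int) :=
  if v - ((groups.getLastD []).getLastD 0) ≤ max_gap then
    groups.dropLast ++ [groups.getLastD [] ++ [v]]
  else
    groups ++ [[v]]

def cluster_consecutive_py (indices : List Int) (max_gap : Int) : List (List Int) :=
  match indices with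
  | [] => []
  | h :: t => t.foldl (stepA max_gap) [[h]]

-- ===== PORT B =====
-- inner while loop of Source B: advance j while j < n and vals[j] - vals[j-1] <= max_gap
-- (both indices are in range whenever the condition is evaluated, so getD is exact)
def runEndB (vals : List Int) (max_gap : Int) (n j : Nat) : Nat :=
  if j < n ∧ vals.getD j 0 - vals.getD (j - 1) 0 ≤ max_gap then
    runEndB vals max_gap n (j + 1)
  else j
termination_by n - j

-- termination bound for the outer loop, cited by outerB's decreasing_by
theorem runEndB_ge (vals : List Int) (max_gap : Int) (n j : Nat) : j ≤ runEndB vals max_gap n j := by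
  unfold runEndB
  split
  · exact le_trans (Nat.le_succ j) (runEndB_ge vals max_gap n (j + 1))
  · exact le_refl j
termination_by n - j

-- outer while loop of Source B; vals[i:j] with 0 ≤ i ≤ j ≤ n is exactly (vals.drop i).take (j - i)
def outerB (vals : List Int) (max_gap : Int) (n i : Nat) : List (List Int) :=
  if i < n then
    ((vals.drop i).take (runEndB vals max_gap n (i + 1) - i)) ::
      outerB vals max_gap n (runEndB vals max_gap n (i + 1))
  else []
termination_by n - i
decreasing_by
  have h := runEndB_ge vals max_gap n (i + 1)
  omega

-- vals = [int(v) for v in indices] is the identity on Int inputs; n = len(vals); i starts at 0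
def cluster_consecutive_py_alt (indices : List Int) (max_gap : Int) : List (List Int) :=
  outerB indices max_gap indices.length 0

-- ===== PRECONDITION & SPEC =====
def Spec_cluster_consecutive_py (indices : List Int) (max_gap : Int) (out : List (List Int)) : Prop := out = cluster_consecutive_py_alt indices max_gap
instance (indices : List Int) (max_gap : Int) (out : List (List Int)) : Decidable (Spec_cluster_consecutive_py indices max_gap out) := by unfold Spec_cluster_consecutive_py; infer_instance

-- ===== CLAIM (what is proved, stated in full; the proofs are below) =====
def Claim_equal_cluster_consecutive_py : Prop := ∀ (indices : List Int) (max_gap : Int), Dom_cluster_consecutive_py indices max_gap → Spec_cluster_consecutive_py indices max_gap (cluster_consecutive_py indices max_gap)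

-- ===== LEMMAS AND PROOFS =====

-- canonical run-splitting recursion: both ports are reduced to goRuns
def takeRun (g prev : Int) : List Int → List Int × List Int
  | [] => ([], [])
  | v :: t =>
    if v - prev ≤ g then
      let p := takeRun g v t
      (v :: p.1, p.2)
    else ([], v :: t)

theorem takeRun_snd_length (g prev : Int) (t : List Int) :
    (takeRun g prev t).2.length ≤ t.length := by
  induction t generalizing prev with
  | nil => simp only [takeRun]; simp
  | cons v t ih =>
    simp only [takeRun]
    split
    · exact le_trans (ih v) (Nat.le_succ _)
    · simp

def goRuns (g : Int) : List Int → List (List Int)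
  | [] => []
  | h :: t =>
    let p := takeRun g h t
    (h :: p.1) :: goRuns g p.2
termination_by l => l.length
decreasing_by
  have := takeRun_snd_length g h t
  simp only [List.length_cons]
  omega

theorem goRuns_nil (g : Int) : goRuns g [] = [] := by rw [goRuns.eq_def]

theorem goRuns_cons (g h : Int) (t : List Int) :
    goRuns g (h :: t) = (h :: (takeRun g h t).1) :: goRuns g (takeRun g h t).2 := by
  rw [goRuns.eq_def]

theorem getLastD_concat' {α : Type} (l : List α) (a d : α) : (l ++ [a]).getLastD d = a := by
  simp [List.getLastD_eq_getLast?]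

-- a prefix of completed groups is inert under A's step
theorem foldl_stepA_append (g : Int) (t : List Int) :
    ∀ (gs : List (List Int)) (g0 : List Int),
      t.foldl (stepA g) (gs ++ [g0]) = gs ++ t.foldl (stepA g) [g0] := by
  induction t with
  | nil => intro gs g0; rfl
  | cons v t ih =>
    intro gs g0
    have h1 : (gs ++ [g0]).getLastD [] = g0 := getLastD_concat' gs g0 []
    have h2 : ([g0] : List (List Int)).getLastD [] = g0 := rfl
    have h4 : ([g0] : List (List Int)).dropLast = [] := rfl
    simp only [List.foldl_cons, stepA, h1, h2, h4, List.dropLast_concat, List.nil_append]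
    split
    · exact ih gs (g0 ++ [v])
    · rw [ih (gs ++ [g0]) [v], ih [g0] [v], List.append_assoc]

-- the fold, started on a single open group a ++ [prev], first finishes prev's run
theorem foldl_stepA_run (g : Int) (t : List Int) :
    ∀ (a : List Int) (prev : Int),
      t.foldl (stepA g) [a ++ [prev]] =
        (a ++ prev :: (takeRun g prev t).1) :: goRuns g (takeRun g prev t).2 := by
  induction t with
  | nil => intro a prev; simp [takeRun, goRuns_nil]
  | cons v t ih =>
    intro a prev
    have h2 : ([a ++ [prev]] : List (List Int)).getLastD [] = a ++ [prev] := rfl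
    have h3 : (a ++ [prev]).getLastD 0 = prev := getLastD_concat' a prev 0
    have h4 : ([a ++ [prev]] : List (List Int)).dropLast = [] := rfl
    simp only [List.foldl_cons, stepA, h2, h3, h4, List.nil_append, takeRun]
    split
    · rw [List.append_assoc]
      simpa using ih (a ++ [prev]) v
    · rw [foldl_stepA_append g t [a ++ [prev]] [v]]
      have h := ih [] v
      simp only [List.nil_append] at h
      rw [h, goRuns_cons]
      simp

theorem clusterA_eq_goRuns (indices : List Int) (g : Int) :
    cluster_consecutive_py indices g = goRuns g indices := by
  cases indices with
  | nil => rw [goRuns_nil]; rfl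
  | cons h t =>
    have := foldl_stepA_run g t [] h
    simp only [List.nil_append] at this
    rw [cluster_consecutive_py, this, goRuns_cons]

-- the inner index scan finds exactly the end of takeRun's run
theorem runEndB_eq (vals : List Int) (g : Int) :
    ∀ (t : List Int) (j : Nat) (prev : Int), 1 ≤ j → vals.drop j = t →
      vals.getD (j - 1) 0 = prev →
      runEndB vals g vals.length j = j + (takeRun g prev t).1.length := by
  intro t
  induction t with
  | nil =>
    intro j prev _ hdrop _
    have hj : vals.length ≤ j := by
      by_contra hlt
      push_neg at hlt
      have := List.drop_eq_nil_iff.mp hdrop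
      omega
    unfold runEndB
    rw [if_neg (by omega)]
    simp [takeRun]
  | cons v t ih =>
    intro j prev hj hdrop hprev
    have hjlt : j < vals.length := by
      by_contra hge
      push_neg at hge
      rw [List.drop_eq_nil_of_le hge] at hdrop
      simp at hdrop
    have hcons : vals[j] :: vals.drop (j + 1) = v :: t := by
      rw [← List.drop_eq_getElem_cons hjlt]; exact hdrop
    have hv : vals[j] = v := (List.cons.injEq _ _ _ _ ▸ hcons :
      vals[j] = v ∧ vals.drop (j + 1) = t).1
    have hdrop' : vals.drop (j + 1) = t := (List.cons.injEq _ _ _ _ ▸ hcons :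
      vals[j] = v ∧ vals.drop (j + 1) = t).2
    have hget : vals.getD j 0 = v := by
      simp [List.getD, List.getElem?_eq_getElem hjlt, hv]
    unfold runEndB
    simp only [takeRun]
    by_cases hc : v - prev ≤ g
    · rw [if_pos ⟨hjlt, by rw [hget, hprev]; exact hc⟩,
        ih (j + 1) v (by omega) hdrop' (by simpa [List.getD] using hget)]
      simp [hc]
      omega
    · rw [if_neg (by rw [hget, hprev]; exact fun h => hc h.2)]
      simp [hc]

-- the list is the collected run followed by the remainder
theorem takeRun_append (g prev : Int) (t : List Int) :
    (takeRun g prev t).1 ++ (takeRun g prev t).2 = t := by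
  induction t generalizing prev with
  | nil => simp [takeRun]
  | cons v t ih =>
    simp only [takeRun]
    split
    · simpa using ih v
    · simp

theorem outerB_eq (vals : List Int) (g : Int) :
    ∀ (m i : Nat), vals.length - i ≤ m →
      outerB vals g vals.length i = goRuns g (vals.drop i) := by
  intro m
  induction m with
  | zero =>
    intro i hi
    unfold outerB
    rw [if_neg (by omega), List.drop_eq_nil_of_le (by omega), goRuns_nil]
  | succ m ih =>
    intro i hi
    by_cases hlt : i < vals.length
    · have hdrop : vals.drop i = vals[i] :: vals.drop (i + 1) := List.drop_eq_getElem_cons hlt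
      have hprev : vals.getD ((i + 1) - 1) 0 = vals[i] := by
        simp [List.getD, List.getElem?_eq_getElem hlt]
      have hre := runEndB_eq vals g (vals.drop (i + 1)) (i + 1) vals[i] (by omega) rfl hprev
      set r1 := (takeRun g vals[i] (vals.drop (i + 1))).1 with hr1
      set r2 := (takeRun g vals[i] (vals.drop (i + 1))).2 with hr2
      have happ : r1 ++ r2 = vals.drop (i + 1) := takeRun_append _ _ _
      unfold outerB
      rw [if_pos hlt, hre]
      have hdrop2 : vals.drop (i + 1 + r1.length) = r2 := by
        have h5 : vals.drop (i + 1 + r1.length) = (vals.drop (i + 1)).drop r1.length := by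
          rw [List.drop_drop]
        rw [h5, ← happ, List.drop_left]
      have htake : (vals.drop i).take (i + 1 + r1.length - i) = vals[i] :: r1 := by
        rw [hdrop, show i + 1 + r1.length - i = r1.length + 1 by omega]
        simp only [List.take_succ_cons, ← happ]
        rw [List.take_left]
      have hr2len : r2.length ≤ vals.length - (i + 1) := by
        have h6 := takeRun_snd_length g vals[i] (vals.drop (i + 1))
        rw [← hr2] at h6
        simpa using h6
      rw [htake, ih (i + 1 + r1.length) (by omega), hdrop2, hdrop, goRuns_cons, ← hr1, ← hr2]
    · unfold outerB
      rw [if_neg hlt, List.drop_eq_nil_of_le (by omega), goRuns_nil]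

-- ===== VERDICT (by name: the statement is the Claim_ definition above) =====
theorem cluster_consecutive_py_spec : Claim_equal_cluster_consecutive_py := by
  intro indices max_gap _
  unfold Spec_cluster_consecutive_py cluster_consecutive_py_alt
  rw [clusterA_eq_goRuns, outerB_eq indices max_gap indices.length 0 (by omega)]
  rfl
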